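-- pv_equiv track=rewrite | github.com/NgoDinhHao/bmttnc-DinhHao-0838 | Buoi2/cipher/playfair/playfair_cipher.py | preprocess_plaintext
-- ===== SOURCE A (Python) =====
-- def preprocess_plaintext(plain_text):
--     # Replace J with I, remove non-alpha, and handle duplicate pairs by inserting X
--     plain_text = plain_text.replace("J", "I").upper()
--     plain_text = ''.join(filter(str.isalpha, plain_text))
--
--     result = ""
--     i = 0
--     while i < len(plain_text):
--         char1 = plain_text[i]
--         if i + 1 < len(plain_text):
--             char2 = plain_text[i + 1]
--             if char1 == char2:
--                 result += char1 + "X"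
--                 i += 1
--             else:
--                 result += char1 + char2
--                 i += 2
--         else:
--             result += char1 + "X"
--             i += 1
--     return result
-- ===== SOURCE B (Python) =====
-- def preprocess_plaintext(plain_text):
--     # Streaming digram builder: one pass with a carried 'pending' first-letter,
--     # alpha-filtering fused into the loop (instead of index-stride while-loop).
--     plain_text = plain_text.replace("J", "I").upper()
--     out = []
--     pending = None
--     for c in plain_text:
--         if not c.isalpha():
--             continue
--         if pending is None:
--             pending = c
--         elif pending == c:
--             out.append(pending)
--             out.append("X")
--         else:
--             out.append(pending)
--             out.append(c)
--             pending = None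
--     if pending is not None:
--         out.append(pending)
--         out.append("X")
--     return ''.join(out)
-- ===== Notes on version B (the rewrite author's own statement) =====
-- stated objective: faster
-- what changed: Replaces the index-based two-pointer while-loop (stride 1 or 2, repeated string += concatenation and indexing) by one streaming for-each pass carrying the open digram's first letter, with the alpha filter fused into the same pass and output collected in a list joined once.
import Mathlib
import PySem

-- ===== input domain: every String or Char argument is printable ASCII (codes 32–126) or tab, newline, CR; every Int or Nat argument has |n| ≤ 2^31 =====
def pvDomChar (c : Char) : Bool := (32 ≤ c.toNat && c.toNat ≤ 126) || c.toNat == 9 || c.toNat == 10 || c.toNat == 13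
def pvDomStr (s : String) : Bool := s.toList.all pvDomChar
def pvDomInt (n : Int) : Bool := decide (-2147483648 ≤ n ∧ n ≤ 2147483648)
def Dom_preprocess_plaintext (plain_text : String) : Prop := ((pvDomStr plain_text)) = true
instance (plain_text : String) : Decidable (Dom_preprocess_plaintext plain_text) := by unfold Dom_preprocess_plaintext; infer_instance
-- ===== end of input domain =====

-- B replaces A's index-stride while-loop by one streaming pass with a carried 'pending' letter
-- (alpha filter fused into the pass); objective: a faster (list-accumulating, single-pass) decomposition; a timing run measured B faster.

-- ===== PORT A =====
-- A's while-loop: i steps by 1 or 2, result built by appending to the accumulator.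
def pvLoopA (pt : List Char) (i : Nat) (result : List Char) : List Char :=
  if h : i < pt.length then
    let char1 := pt[i]
    if h2 : i + 1 < pt.length then
      let char2 := pt[i + 1]
      if char1 == char2 then
        pvLoopA pt (i + 1) (result ++ [char1, 'X'])
      else
        pvLoopA pt (i + 2) (result ++ [char1, char2])
    else
      pvLoopA pt (i + 1) (result ++ [char1, 'X'])
  else result
termination_by pt.length - i

def preprocess_plaintext (plain_text : String) : String :=
  let pt := PySem.Chars.upper (PySem.Chars.replace plain_text.toList ['J'] ['I'])
  let pt := pt.filter PySem.Chars.isalpha     -- ''.join(filter(str.isalpha, ...))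
  String.ofList (pvLoopA pt 0 [])

-- ===== PORT B =====
-- B's single pass: skip non-alpha, carry the pending first letter of the open digram, flush at the end.
def pvLoopB (cs : List Char) (pending : Option Char) (out : List Char) : List Char :=
  match cs with
  | [] =>
    match pending with
    | none => out
    | some p => out ++ [p, 'X']
  | c :: rest =>
    if PySem.Chars.isalpha c then
      match pending with
      | none => pvLoopB rest (some c) out
      | some p =>
        if p == c then pvLoopB rest (some c) (out ++ [p, 'X'])
        else pvLoopB rest none (out ++ [p, c])
    else pvLoopB rest pending out

def preprocess_plaintext_alt (plain_text : String) : String :=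
  let cs := PySem.Chars.upper (PySem.Chars.replace plain_text.toList ['J'] ['I'])
  String.ofList (pvLoopB cs none [])

-- ===== PRECONDITION & SPEC =====
def Spec_preprocess_plaintext (plain_text : String) (out : String) : Prop := out = preprocess_plaintext_alt plain_text
instance (plain_text : String) (out : String) : Decidable (Spec_preprocess_plaintext plain_text out) := by unfold Spec_preprocess_plaintext; infer_instance

-- ===== CLAIM (what is proved, stated in full; the proofs are below) =====
def Claim_equal_preprocess_plaintext : Prop := ∀ (plain_text : String), Dom_preprocess_plaintext plain_text → Spec_preprocess_plaintext plain_text (preprocess_plaintext plain_text)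

-- ===== LEMMAS AND PROOFS =====

-- B's loop on the raw list = B's loop restricted to the alpha characters.
lemma pvLoopB_filter (cs : List Char) : ∀ (p : Option Char) (out : List Char),
    pvLoopB cs p out = pvLoopB (cs.filter PySem.Chars.isalpha) p out := by
  induction cs with
  | nil => intro p out; rfl
  | cons c rest ih =>
    intro p out
    by_cases hc : PySem.Chars.isalpha c
    · simp [pvLoopB, hc]
      cases p with
      | none => exact ih _ _
      | some q => dsimp only; split_ifs <;> exact ih _ _
    · simp [pvLoopB, hc, ih]

-- A's index loop over a list = B's streaming loop (with empty pending) over the suffix.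
lemma pvLoopA_eq_pvLoopB (n : Nat) : ∀ (pt : List Char) (i : Nat) (acc : List Char),
    (∀ c ∈ pt, PySem.Chars.isalpha c = true) →
    pt.length - i ≤ n → pvLoopA pt i acc = pvLoopB (pt.drop i) none acc := by
  induction n with
  | zero =>
    intro pt i acc hall h
    have hle : pt.length ≤ i := by omega
    rw [List.drop_eq_nil_of_le hle]
    rw [pvLoopA]
    rw [dif_neg (by omega)]
    rfl
  | succ n ih =>
    intro pt i acc hall h
    by_cases h1 : i < pt.length
    · by_cases h2 : i + 1 < pt.length
      · rw [List.drop_eq_getElem_cons h1, List.drop_eq_getElem_cons h2]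
        rw [pvLoopA, dif_pos h1, dif_pos h2]
        by_cases heq : pt[i] = pt[i + 1]
        · simp only [heq, beq_self_eq_true, if_true]
          rw [ih pt (i + 1) _ hall (by omega), List.drop_eq_getElem_cons h2]
          have hA2 : PySem.Chars.isalpha (pt[i + 1]) = true := hall _ (List.getElem_mem h2)
          simp [pvLoopB, hA2]
        · have hne : (pt[i] == pt[i + 1]) = false := by simp [heq]
          rw [if_neg (by simp [heq])]
          rw [ih pt (i + 2) _ hall (by omega)]
          have hA1 : PySem.Chars.isalpha (pt[i]) = true := hall _ (List.getElem_mem h1)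
          have hA2 : PySem.Chars.isalpha (pt[i+1]) = true := hall _ (List.getElem_mem h2)
          simp [pvLoopB, hA1, hA2, hne]
      · have hlast : pt.length = i + 1 := by omega
        rw [pvLoopA, dif_pos h1, dif_neg h2]
        rw [ih pt (i + 1) _ hall (by omega), List.drop_eq_nil_of_le (by omega)]
        rw [List.drop_eq_getElem_cons h1, List.drop_eq_nil_of_le (by omega)]
        have hA : PySem.Chars.isalpha (pt[i]) = true := hall _ (List.getElem_mem h1)
        simp [pvLoopB, hA]
    · rw [pvLoopA, dif_neg h1, List.drop_eq_nil_of_le (by omega)]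
      rfl

-- ===== VERDICT (by name: the statement is the Claim_ definition above) =====
theorem preprocess_plaintext_spec : Claim_equal_preprocess_plaintext := by
  intro plain_text _
  unfold Spec_preprocess_plaintext
  simp only [preprocess_plaintext, preprocess_plaintext_alt]
  rw [pvLoopB_filter]
  rw [pvLoopA_eq_pvLoopB (PySem.Chars.upper (PySem.Chars.replace plain_text.toList ['J'] ['I'])
        |>.filter PySem.Chars.isalpha).length _ 0 [] (by intro c hc; exact (List.mem_filter.mp hc).2) (by omega)]
  rfl
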